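-- pv_equiv track=rewrite | github.com/LIKELION-Instruction-Generator/Instruction-Generator | src/stt_quiz_service/services/quiz_profiles.py | expand_profile_counts
-- ===== SOURCE A (Python) =====
-- from typing import Literal
--
-- QuestionProfile = Literal["basic_eval_4", "review_5", "retest_5"]
--
-- PROFILE_PRIORITY: list[QuestionProfile] = ["review_5", "basic_eval_4", "retest_5"]
--
-- def expand_profile_counts(profile_counts: dict[QuestionProfile, int]) -> list[QuestionProfile]:
--     remaining = dict(profile_counts)
--     sequence: list[QuestionProfile] = []
--     while sum(remaining.values()) > 0:
--         ranked = sorted(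
--             [profile for profile, count in remaining.items() if count > 0],
--             key=lambda profile: (
--                 remaining[profile],
--                 -PROFILE_PRIORITY.index(profile),
--             ),
--             reverse=True,
--         )
--         for profile in ranked:
--             if remaining[profile] > 0:
--                 sequence.append(profile)
--                 remaining[profile] -= 1
--     return sequence
-- ===== SOURCE B (Python) =====
-- PROFILE_PRIORITY = ["review_5", "basic_eval_4", "retest_5"]
--
-- def expand_profile_counts(profile_counts):
--     # The per-round ranking of survivors never changes (each round decrements
--     # every survivor once, preserving the (count, priority) order), and a
--     # profile survives round r exactly when its ORIGINAL count exceeds r.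
--     # So: sort once, never mutate counts, and emit round r as a filter of the
--     # fixed order by counts[p] > r, keeping A's running-sum termination test.
--     counts = dict(profile_counts)
--     order = sorted(
--         [p for p, c in counts.items() if c > 0],
--         key=lambda p: (counts[p], -PROFILE_PRIORITY.index(p)),
--         reverse=True,
--     )
--     sequence = []
--     total = sum(counts.values())
--     r = 0
--     while total > 0:
--         batch = [p for p in order if counts[p] > r]
--         sequence.extend(batch)
--         total -= len(batch)
--         r += 1
--     return sequence
-- ===== Notes on version B (the rewrite author's own statement) =====
-- stated objective: alternative
-- what changed: B sorts the survivors once up front and never mutates the counts: round r is emitted as a filter of the fixed order by original_count > r with a running total for A's termination test, replacing A's per-round dict re-sort, re-sum and in-place decrementing.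
-- outside the precondition, e.g. on expand_profile_counts({'x': 1, 'y': -1}): A returns [], B raises ValueError
import Mathlib
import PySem

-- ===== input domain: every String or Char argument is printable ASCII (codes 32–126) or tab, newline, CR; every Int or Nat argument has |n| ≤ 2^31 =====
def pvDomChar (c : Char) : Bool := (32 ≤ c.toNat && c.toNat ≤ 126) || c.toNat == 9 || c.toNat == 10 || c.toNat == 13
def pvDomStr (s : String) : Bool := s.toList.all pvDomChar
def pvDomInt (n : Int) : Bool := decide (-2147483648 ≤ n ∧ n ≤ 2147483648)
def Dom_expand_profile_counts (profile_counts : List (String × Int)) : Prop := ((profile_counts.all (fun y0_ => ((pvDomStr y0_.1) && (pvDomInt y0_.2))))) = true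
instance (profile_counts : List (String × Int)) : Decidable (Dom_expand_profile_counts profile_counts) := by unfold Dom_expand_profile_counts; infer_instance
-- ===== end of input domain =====

-- B sorts the survivors once and never mutates the counts: round r is the fixed order filtered by
-- original_count > r, with a running total for A's termination test; equal return values on Pre_.

-- ===== PORT A =====
def pvPriority : List String := ["review_5", "basic_eval_4", "retest_5"]

-- -PROFILE_PRIORITY.index(p); the ValueError case (p not in the list) is excluded by Pre_
def pvNegIdx (p : String) : Int := -(((PySem.List.index? pvPriority p).getD 0 : Nat) : Int)

-- sorted([profile for profile, count in remaining.items() if count > 0],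
--        key=lambda p: (remaining[p], -PROFILE_PRIORITY.index(p)), reverse=True)
def pvRankedA (d : PySem.Dict String Int) : List String :=
  PySem.List.sorted2 ((d.items.filter (fun pc => decide (0 < pc.2))).map Prod.fst)
    (fun p => d.getD p 0) (fun p => pvNegIdx p) true

-- the inner 'for profile in ranked: if remaining[profile] > 0: append; decrement'
def pvRoundA (st : List String × PySem.Dict String Int) : List String × PySem.Dict String Int :=
  (pvRankedA st.2).foldl
    (fun st p => if 0 < st.2.getD p 0
      then (st.1 ++ [p], st.2.insert p (st.2.getD p 0 - 1)) else st) st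

-- 'while sum(remaining.values()) > 0'; fuel is a totality guard only (the loop exits by its own test)
def pvLoopA : Nat → (List String × PySem.Dict String Int) → List String
  | 0, st => st.1
  | n+1, st => if 0 < st.2.values.sum then pvLoopA n (pvRoundA st) else st.1

def expand_profile_counts (profile_counts : List (String × Int)) : List String :=
  let remaining := PySem.Dict.ofList profile_counts
  pvLoopA ((remaining.values.map Int.toNat).sum + 1) ([], remaining)

-- ===== PORT B =====
-- the one up-front sort of the positive-count profiles, computed on the immutable counts dict
def pvOrderB (counts : PySem.Dict String Int) : List String :=
  PySem.List.sorted2 ((counts.items.filter (fun pc => decide (0 < pc.2))).map Prod.fst)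
    (fun p => counts.getD p 0) (fun p => pvNegIdx p) true

-- '[p for p in order if counts[p] > r]'
def pvBatchB (counts : PySem.Dict String Int) (order : List String) (r : Int) : List String :=
  order.filter (fun p => decide (r < counts.getD p 0))

-- 'while total > 0: batch; extend; total -= len(batch); r += 1'; fuel is a totality guard only
def pvLoopB (counts : PySem.Dict String Int) (order : List String) :
    Nat → List String → Int → Int → List String
  | 0, seq, _, _ => seq
  | n+1, seq, total, r =>
    if 0 < total then
      let batch := pvBatchB counts order r
      pvLoopB counts order n (seq ++ batch) (total - batch.length) (r + 1)
    else seq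

def expand_profile_counts_alt (profile_counts : List (String × Int)) : List String :=
  let counts := PySem.Dict.ofList profile_counts
  let order := pvOrderB counts
  pvLoopB counts order ((counts.values.map Int.toNat).sum + 1) [] counts.values.sum 0

-- ===== PRECONDITION & SPEC =====
-- Pre_ excludes inputs where some key with positive (final) count is not in PROFILE_PRIORITY:
-- A's in-loop sort raises ValueError on all of them except the degenerate nonpositive-total case
-- (where A returns [] before touching the bad key), and B's up-front sort raises on all of them.
def Pre_expand_profile_counts (profile_counts : List (String × Int)) : Prop :=
  ∀ pv ∈ profile_counts, 0 < (PySem.Dict.ofList profile_counts).getD pv.1 0 →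
    pv.1 ∈ (["review_5", "basic_eval_4", "retest_5"] : List String)
instance (profile_counts : List (String × Int)) : Decidable (Pre_expand_profile_counts profile_counts) := by
  unfold Pre_expand_profile_counts; infer_instance

def pvWitness_expand_profile_counts : (List (String × Int)) :=
  [("review_5", 2), ("retest_5", 1), ("basic_eval_4", 2), ("other", -3)]

def Spec_expand_profile_counts (profile_counts : List (String × Int)) (out : List String) : Prop := out = expand_profile_counts_alt profile_counts
instance (profile_counts : List (String × Int)) (out : List String) : Decidable (Spec_expand_profile_counts profile_counts out) := by unfold Spec_expand_profile_counts; infer_instance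

-- ===== CLAIM (what is proved, stated in full; the proofs are below) =====
def Claim_equal_expand_profile_counts : Prop := ∀ (profile_counts : List (String × Int)), Dom_expand_profile_counts profile_counts → Pre_expand_profile_counts profile_counts → Spec_expand_profile_counts profile_counts (expand_profile_counts profile_counts)

-- ===== LEMMAS AND PROOFS =====

-- the sort key as one lexicographic value
def pvKey (d : PySem.Dict String Int) (p : String) : Lex (Int × Int) := toLex (d.getD p 0, pvNegIdx p)

-- decrementing every profile of R once
def pvDec (d : PySem.Dict String Int) (R : List String) : PySem.Dict String Int :=
  R.foldl (fun d p => d.insert p (d.getD p 0 - 1)) d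

-- Python's tuple sort IS the sort by the lexicographic key (both are the same insertBy fold)
theorem pv_sorted2_eq_sorted_lex (xs : List String) (k1 k2 : String → Int) (rev : Bool) :
    PySem.List.sorted2 xs k1 k2 rev =
      PySem.List.sorted xs (fun a => toLex (k1 a, k2 a)) rev := by
  unfold PySem.List.sorted2 PySem.List.sorted
  have hbe : (fun (a b : String) => decide (k1 a < k1 b) || (!decide (k1 b < k1 a) && decide (k2 a < k2 b)))
      = fun (a b : String) => decide ((toLex (k1 a, k2 a) : Lex (Int × Int)) < toLex (k1 b, k2 b)) := by
    funext a b
    by_cases h1 : k1 a < k1 b <;> by_cases h2 : k1 b < k1 a <;> by_cases h3 : k2 a < k2 b <;>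
      simp [h1, h2, h3, Prod.Lex.toLex_lt_toLex] <;> omega
  rw [hbe]

theorem pv_getD_dec (d : PySem.Dict String Int) (R : List String) (hR : R.Nodup) (p : String) :
    (pvDec d R).getD p 0 = d.getD p 0 - (if p ∈ R then 1 else 0) := by
  induction R generalizing d with
  | nil => simp [pvDec]
  | cons q R ih =>
    rcases List.nodup_cons.mp hR with ⟨hq, hR'⟩
    show (pvDec (d.insert q (d.getD q 0 - 1)) R).getD p 0 = _
    rw [ih _ hR', PySem.Dict.getD_insert]
    by_cases hpq : p = q
    · subst hpq; simp [hq]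
    · by_cases hpR : p ∈ R <;> simp [hpq, hpR, List.mem_cons]

theorem pv_keys_dec (d : PySem.Dict String Int) (R : List String)
    (hc : ∀ p ∈ R, d.contains p = true) : (pvDec d R).keys = d.keys := by
  induction R generalizing d with
  | nil => rfl
  | cons q R ih =>
    show (pvDec (d.insert q (d.getD q 0 - 1)) R).keys = d.keys
    rw [ih]
    · exact PySem.Dict.keys_insert_of_contains d _ (hc q (List.mem_cons_self))
    · intro p hp
      rw [PySem.Dict.contains_insert]
      simp [hc p (List.mem_cons_of_mem q hp)]

-- sum over a nodup key list when one entry changes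
theorem pv_sum_map_update (K : List String) (hK : K.Nodup) (p : String) (hp : p ∈ K)
    (f : String → Int) (w : Int) :
    (K.map (fun k => if k = p then w else f k)).sum = (K.map f).sum - f p + w := by
  induction K with
  | nil => cases hp
  | cons q K ih =>
    rcases List.nodup_cons.mp hK with ⟨hq, hK'⟩
    rcases List.mem_cons.mp hp with rfl | hp'
    · have hK0 : ∀ k ∈ K, (if k = p then w else f k) = f k := by
        intro k hk'; rw [if_neg]; rintro rfl; exact hq hk'
      simp only [List.map_cons, List.sum_cons, List.map_congr_left hK0]
      rw [if_pos trivial]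
      ring
    · have hqp : ¬ (q = p) := by rintro rfl; exact hq hp'
      simp only [List.map_cons, List.sum_cons, if_neg hqp, ih hK' hp']
      ring

theorem pv_sum_insert (d : PySem.Dict String Int) (p : String) (w : Int)
    (hk : d.keys.Nodup) (hc : d.contains p = true) :
    (d.insert p w).values.sum = d.values.sum - d.getD p 0 + w := by
  have hk' : (d.insert p w).keys = d.keys := PySem.Dict.keys_insert_of_contains d _ hc
  rw [PySem.Dict.values_eq_map_keys _ (by rw [hk']; exact hk) 0,
      PySem.Dict.values_eq_map_keys _ hk 0, hk']
  have : ∀ k ∈ d.keys, (d.insert p w).getD k 0 = if k = p then w else d.getD k 0 := by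
    intro k _; rw [PySem.Dict.getD_insert]
  rw [List.map_congr_left this,
      pv_sum_map_update d.keys hk p ((PySem.Dict.contains_iff_mem_keys d p).mp hc)]

theorem pv_sum_dec (d : PySem.Dict String Int) (R : List String) (hR : R.Nodup)
    (hc : ∀ p ∈ R, d.contains p = true) (hk : d.keys.Nodup) :
    (pvDec d R).values.sum = d.values.sum - R.length := by
  induction R generalizing d with
  | nil => simp [pvDec]
  | cons q R ih =>
    rcases List.nodup_cons.mp hR with ⟨hq, hR'⟩
    show (pvDec (d.insert q (d.getD q 0 - 1)) R).values.sum = _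
    have hcq := hc q (List.mem_cons_self)
    have hkeq : (d.insert q (d.getD q 0 - 1)).keys = d.keys :=
      PySem.Dict.keys_insert_of_contains d _ hcq
    rw [ih _ hR' ?_ (by rw [hkeq]; exact hk)]
    · rw [pv_sum_insert d q _ hk hcq]
      simp only [List.length_cons]
      push_cast
      ring
    · intro p hp
      rw [PySem.Dict.contains_insert]
      simp [hc p (List.mem_cons_of_mem q hp)]

theorem pv_roundFoldA (R : List String) : ∀ (seq : List String) (d : PySem.Dict String Int),
    R.Nodup → (∀ p ∈ R, 0 < d.getD p 0) →
    R.foldl (fun st p => if 0 < st.2.getD p 0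
        then (st.1 ++ [p], st.2.insert p (st.2.getD p 0 - 1)) else st) (seq, d)
      = (seq ++ R, pvDec d R) := by
  induction R with
  | nil => intro seq d _ _; simp [pvDec]
  | cons q R ih =>
    intro seq d hnd hpos
    rcases List.nodup_cons.mp hnd with ⟨hq, hR'⟩
    simp only [List.foldl_cons, if_pos (hpos q List.mem_cons_self)]
    rw [ih (seq ++ [q]) _ hR' ?_]
    · simp [pvDec]
    · intro p hp
      rw [PySem.Dict.getD_insert, if_neg (by rintro rfl; exact hq hp)]
      exact hpos p (List.mem_cons_of_mem q hp)

-- membership in the unsorted survivor list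
theorem pv_mem_posList (d : PySem.Dict String Int) (hk : d.keys.Nodup) (p : String) :
    p ∈ (d.items.filter (fun pc => decide (0 < pc.2))).map Prod.fst ↔ 0 < d.getD p 0 := by
  constructor
  · intro h
    rcases List.mem_map.mp h with ⟨pc, hpc, rfl⟩
    rcases List.mem_filter.mp hpc with ⟨hmem, hposb⟩
    have := PySem.Dict.getD_of_mem_items d (k := pc.1) (v := pc.2) hmem hk 0
    rw [this]
    exact of_decide_eq_true hposb
  · intro h
    have hc : d.contains p = true := by
      by_contra hc
      rw [PySem.Dict.getD_of_not_contains d 0 (by simpa using hc)] at h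
      omega
    rw [PySem.Dict.contains_eq_isSome_get?] at hc
    rcases Option.isSome_iff_exists.mp hc with ⟨v, hv⟩
    have hvd := PySem.Dict.getD_of_get?_eq_some d 0 hv
    refine List.mem_map.mpr ⟨(p, v), List.mem_filter.mpr ⟨?_, ?_⟩, rfl⟩
    · exact (PySem.Dict.get?_eq_some_iff_mem_items d p v hk).mp hv
    · simp only [decide_eq_true_eq]
      rw [← hvd]
      exact h

theorem pv_nodup_posList (d : PySem.Dict String Int) (hk : d.keys.Nodup) :
    ((d.items.filter (fun pc => decide (0 < pc.2))).map Prod.fst).Nodup := by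
  have hs : ((d.items.filter (fun pc => decide (0 < pc.2))).map Prod.fst).Sublist
      (d.items.map Prod.fst) := List.Sublist.map Prod.fst List.filter_sublist
  exact hs.nodup hk

-- the loop invariant over A's mutable dict d, coupled with B's immutable (counts, r):
-- on every profile of the fixed order, d's entry is the original count clipped after r rounds
def pvInv (order : List String) (counts d : PySem.Dict String Int) (r : Int) : Prop :=
  d.keys.Nodup ∧ (∀ p, 0 < d.getD p 0 → p ∈ order) ∧
  (order.filter (fun p => decide (0 < d.getD p 0))).Pairwise (fun a b => pvKey d b < pvKey d a) ∧
  (∀ p ∈ order, d.getD p 0 = if r < counts.getD p 0 then counts.getD p 0 - r else 0)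

-- under the invariant, the per-round re-sort IS the fixed order restricted to survivors
theorem pv_ranked_eq_filter (order : List String) (counts d : PySem.Dict String Int) (r : Int)
    (hON : order.Nodup) (hinv : pvInv order counts d r) :
    pvRankedA d = order.filter (fun p => decide (0 < d.getD p 0)) := by
  obtain ⟨hk, hmem, hpair, _⟩ := hinv
  rw [pvRankedA, pv_sorted2_eq_sorted_lex]
  apply PySem.List.sorted_rev_eq_of_perm_of_pairwise_gt
  · rw [List.perm_ext_iff_of_nodup (hON.filter _) (pv_nodup_posList d hk)]
    intro p
    rw [pv_mem_posList d hk, List.mem_filter]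
    constructor
    · rintro ⟨_, h⟩; exact of_decide_eq_true h
    · intro h; exact ⟨hmem p h, decide_eq_true h⟩
  · exact hpair

-- A's survivor filter coincides with B's batch '[p for p in order if counts[p] > r]'
theorem pv_filter_eq_batch (order : List String) (counts d : PySem.Dict String Int) (r : Int)
    (hinv : pvInv order counts d r) :
    order.filter (fun p => decide (0 < d.getD p 0)) = pvBatchB counts order r := by
  obtain ⟨_, _, _, hcnt⟩ := hinv
  apply List.filter_congr
  intro p hp
  rw [hcnt p hp]
  by_cases h : r < counts.getD p 0 <;> simp [h]

theorem pv_inv_step (order : List String) (counts d : PySem.Dict String Int) (r : Int)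
    (hON : order.Nodup) (hinv : pvInv order counts d r) :
    pvInv order counts (pvDec d (order.filter (fun p => decide (0 < d.getD p 0)))) (r + 1) := by
  obtain ⟨hk, hmem, hpair, hcnt⟩ := hinv
  set F := order.filter (fun p => decide (0 < d.getD p 0)) with hFdef
  have hFnd : F.Nodup := hON.filter _
  have hFpos : ∀ p ∈ F, 0 < d.getD p 0 := by
    intro p hp; exact of_decide_eq_true (List.mem_filter.mp hp).2
  have hFc : ∀ p ∈ F, d.contains p = true := by
    intro p hp
    by_contra hc
    have := PySem.Dict.getD_of_not_contains d (k := p) 0 (by simpa using hc)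
    have := hFpos p hp
    omega
  have hgd : ∀ p, (pvDec d F).getD p 0 = d.getD p 0 - (if p ∈ F then 1 else 0) :=
    fun p => pv_getD_dec d F hFnd p
  have hposd : ∀ p, 0 < (pvDec d F).getD p 0 → 0 < d.getD p 0 := by
    intro p hp; rw [hgd p] at hp; split_ifs at hp <;> omega
  refine ⟨?_, ?_, ?_, ?_⟩
  · rw [pv_keys_dec d F hFc]; exact hk
  · intro p hp; exact hmem p (hposd p hp)
  · have hsub : (order.filter (fun p => decide (0 < (pvDec d F).getD p 0))).Sublist F := by
      rw [hFdef]
      apply List.monotone_filter_right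
      intro p hp
      exact decide_eq_true (hposd p (of_decide_eq_true hp))
    have hpair' := hpair.sublist hsub
    apply hpair'.imp_of_mem
    intro a b ha hb hlt
    have haF : a ∈ F := hsub.subset ha
    have hbF : b ∈ F := hsub.subset hb
    have hga := hgd a; have hgb := hgd b
    rw [if_pos haF] at hga; rw [if_pos hbF] at hgb
    simp only [pvKey, Prod.Lex.toLex_lt_toLex] at hlt ⊢
    rw [hga, hgb]
    rcases hlt with h | ⟨h1, h2⟩
    · left; omega
    · right; exact ⟨by omega, h2⟩
  · intro p hp
    have hFiff : p ∈ F ↔ 0 < d.getD p 0 := by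
      rw [hFdef, List.mem_filter]
      simp [hp]
    rw [hgd p, hcnt p hp]
    by_cases hc : r < counts.getD p 0
    · have hpF : p ∈ F := hFiff.mpr (by rw [hcnt p hp, if_pos hc]; omega)
      rw [if_pos hc, if_pos hpF]
      split_ifs <;> omega
    · have hpF : p ∉ F := fun h => by
        have := hFiff.mp h
        rw [hcnt p hp, if_neg hc] at this
        omega
      rw [if_neg hc, if_neg hpF, if_neg (by omega)]
      omega

-- the coupled loops agree, step by step
theorem pv_loop_eq (order : List String) (counts : PySem.Dict String Int) (hON : order.Nodup) :
    ∀ (n : Nat) (d : PySem.Dict String Int) (r : Int) (seq : List String),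
      pvInv order counts d r →
      pvLoopA n (seq, d) = pvLoopB counts order n seq d.values.sum r := by
  intro n
  induction n with
  | zero => intro d r seq _; rfl
  | succ n ih =>
    intro d r seq hinv
    show (if 0 < d.values.sum then pvLoopA n (pvRoundA (seq, d)) else seq)
        = (if 0 < d.values.sum then
            pvLoopB counts order n (seq ++ pvBatchB counts order r)
              (d.values.sum - (pvBatchB counts order r).length) (r + 1) else seq)
    by_cases hs : 0 < d.values.sum
    · rw [if_pos hs, if_pos hs]
      have hk := hinv.1
      have hF := pv_ranked_eq_filter order counts d r hON hinv
      have hB := pv_filter_eq_batch order counts d r hinv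
      set F := order.filter (fun p => decide (0 < d.getD p 0)) with hFdef
      have hFnd : F.Nodup := hON.filter _
      have hFpos : ∀ p ∈ F, 0 < d.getD p 0 := by
        intro p hp; exact of_decide_eq_true (List.mem_filter.mp hp).2
      have hFc : ∀ p ∈ F, d.contains p = true := by
        intro p hp
        by_contra hc
        have := PySem.Dict.getD_of_not_contains d (k := p) 0 (by simpa using hc)
        have := hFpos p hp
        omega
      have hround : pvRoundA (seq, d) = (seq ++ F, pvDec d F) := by
        unfold pvRoundA
        simp only
        rw [hF]
        exact pv_roundFoldA F seq d hFnd hFpos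
      have hsum : (pvDec d F).values.sum = d.values.sum - F.length :=
        pv_sum_dec d F hFnd hFc hk
      rw [hround, ← hB, ← hsum]
      exact ih (pvDec d F) (r + 1) (seq ++ F) (pv_inv_step order counts d r hON hinv)
    · rw [if_neg hs, if_neg hs]

-- pvNegIdx is injective on the three profile names
theorem pv_negIdx_inj (p q : String) (hp : p ∈ pvPriority) (hq : q ∈ pvPriority)
    (h : pvNegIdx p = pvNegIdx q) : p = q := by
  simp only [pvPriority, List.mem_cons, List.not_mem_nil, or_false] at hp hq
  rcases hp with rfl | rfl | rfl <;> rcases hq with rfl | rfl | rfl <;>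
    first
      | rfl
      | (exfalso; revert h; decide)

-- a contained key of dict(pcs) occurs in pcs
theorem pv_contains_ofList (pcs : List (String × Int)) (p : String)
    (h : (PySem.Dict.ofList pcs).contains p = true) : ∃ w, (p, w) ∈ pcs := by
  have hkeys : (PySem.Dict.ofList pcs).keys = PySem.Set.ofList (pcs.map Prod.fst) := by
    rw [show (PySem.Dict.ofList pcs)
          = pcs.foldl (fun d x => d.insert x.1 x.2) PySem.Dict.empty from rfl,
        PySem.Dict.keys_foldl_insert_key]
    rfl
  rw [PySem.Dict.contains_iff_mem_keys, hkeys, PySem.Set.mem_ofList] at h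
  rcases List.mem_map.mp h with ⟨pair, hpair, rfl⟩
  exact ⟨pair.2, by simpa using hpair⟩

theorem pv_inv_init (pcs : List (String × Int)) (hpre : Pre_expand_profile_counts pcs) :
    pvInv (pvOrderB (PySem.Dict.ofList pcs)) (PySem.Dict.ofList pcs) (PySem.Dict.ofList pcs) 0 := by
  set d := PySem.Dict.ofList pcs with hd
  have hk : d.keys.Nodup := PySem.Dict.nodup_keys_ofList pcs
  have hmemO : ∀ p, p ∈ pvOrderB d ↔ 0 < d.getD p 0 := by
    intro p
    rw [pvOrderB, (PySem.List.sorted2_perm _ _ _ _).mem_iff, pv_mem_posList d hk]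
  have hON : (pvOrderB d).Nodup :=
    ((PySem.List.sorted2_perm _ _ _ _).nodup_iff).mpr (pv_nodup_posList d hk)
  have hpri : ∀ p ∈ pvOrderB d, p ∈ pvPriority := by
    intro p hp
    have hpos := (hmemO p).mp hp
    have hc : d.contains p = true := by
      by_contra hc
      have := PySem.Dict.getD_of_not_contains d (k := p) 0 (by simpa using hc)
      omega
    rcases pv_contains_ofList pcs p hc with ⟨w, hw⟩
    exact hpre (p, w) hw hpos
  have hfe : (pvOrderB d).filter (fun p => decide (0 < d.getD p 0)) = pvOrderB d :=
    List.filter_eq_self.mpr (fun p hp => decide_eq_true ((hmemO p).mp hp))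
  refine ⟨hk, fun p hp => (hmemO p).mpr hp, ?_, ?_⟩
  · rw [hfe]
    have hle : (pvOrderB d).Pairwise (fun a b => pvKey d b ≤ pvKey d a) := by
      have := PySem.List.sorted_pairwise_rev
        ((d.items.filter (fun pc => decide (0 < pc.2))).map Prod.fst)
        (fun p => (toLex (d.getD p 0, pvNegIdx p) : Lex (Int × Int)))
      rw [pvOrderB, pv_sorted2_eq_sorted_lex]
      exact this
    have hne : (pvOrderB d).Pairwise (fun a b => a ≠ b) := hON
    refine (hle.and hne).imp_of_mem ?_
    rintro a b ha hb ⟨hleab, hneab⟩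
    rcases lt_or_eq_of_le hleab with h | h
    · exact h
    · exfalso
      apply hneab
      have hpq : pvNegIdx b = pvNegIdx a := congrArg Prod.snd (toLex_inj.mp h)
      exact (pv_negIdx_inj b a (hpri b hb) (hpri a ha) hpq).symm
  · intro p hp
    have hpos := (hmemO p).mp hp
    rw [if_pos hpos]
    omega

theorem pv_orderB_nodup (pcs : List (String × Int)) :
    (pvOrderB (PySem.Dict.ofList pcs)).Nodup := by
  exact ((PySem.List.sorted2_perm _ _ _ _).nodup_iff).mpr
    (pv_nodup_posList _ (PySem.Dict.nodup_keys_ofList pcs))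

-- ===== VERDICT (by name: the statement is the Claim_ definition above) =====
theorem expand_profile_counts_spec : Claim_equal_expand_profile_counts := by
  intro pcs _hdom hpre
  unfold Spec_expand_profile_counts expand_profile_counts expand_profile_counts_alt
  exact pv_loop_eq _ _ (pv_orderB_nodup pcs) _ _ 0 [] (pv_inv_init pcs hpre)
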